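-- pv_equiv track=rewrite | github.com/Lucaslgl0/Projet-Cryptologie-S2 | operations_liste.py | est_plus_grand
-- ===== SOURCE A (Python) =====
-- def supprime_zéros(liste):
--     """Suppression des zéros à l'avant d'une liste
--
--     Cette fonction modifie la liste en enlevant les zéros inutiles devant.
--
--     Args :
--         liste (list) : qui sera notre liste de chiffres
--
--     Returns :
--         None
--     """
--     while True:
--         if liste[0] == 0 and len(liste) != 1:
--             del liste[0]
--         else:
--             t = False
--             return liste
--
-- def est_plus_grand(L1, L2):
--     """Permet de comparer deux listes
--
--     Cette fonction vérifie, chiffre par chiffre dans la liste, si notre première liste est plus grande que la seconde.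
--     Cela va nous être utile par la suite lors de différentes opérations.
--
--     Args :
--         L1, L2 (list): nos deux listes à comparer
--
--     Return :
--         boolean : rend True si L1 est plus grand ou égal à L2 et False sinon
--     """
--     L1 = supprime_zéros(L1)
--     L2 = supprime_zéros(L2)
--     if L1 == L2:
--         return True
--     if len(L1) < len(L2):
--         L1 = [0 for i in range(len(L2) - len(L1))] + L1
--     else:
--         L2 = [0 for i in range(len(L1) - len(L2))] + L2
--     for i in range(len(L1)):
--         if L1[i] == L2[i]:
--             if i == len(L1) - 1:
--                 return False
--             continue
--         elif L1[i] < L2[i]: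
--             return False
--         else:
--             return True
--     return False
-- ===== SOURCE B (Python) =====
-- def est_plus_grand(L1, L2):
--     # Single right-to-left pass: walk the digits from least to most significant,
--     # reading 0 beyond a list's left end (the implicit zero-padding), and let each
--     # more-significant unequal pair override the verdict. Leading zeros compare
--     # equal to padding zeros, so no stripping is needed.
--     ge = True
--     n1, n2 = len(L1), len(L2)
--     for k in range(max(n1, n2)):
--         a = L1[n1 - 1 - k] if k < n1 else 0
--         b = L2[n2 - 1 - k] if k < n2 else 0
--         if a != b:
--             ge = a > b
--     return ge
-- ===== Notes on version B (the rewrite author's own statement) =====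
-- stated objective: alternative
-- what changed: B replaces A's three-stage strip / zero-pad / left-to-right scan by one right-to-left pass that reads 0 beyond a list's left end and lets each more-significant unequal digit pair override the verdict, so no stripping, no padded copies and no separate equality check exist; it trades A's early exit for a single uniform pass and does not mutate its arguments.
import Mathlib
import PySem

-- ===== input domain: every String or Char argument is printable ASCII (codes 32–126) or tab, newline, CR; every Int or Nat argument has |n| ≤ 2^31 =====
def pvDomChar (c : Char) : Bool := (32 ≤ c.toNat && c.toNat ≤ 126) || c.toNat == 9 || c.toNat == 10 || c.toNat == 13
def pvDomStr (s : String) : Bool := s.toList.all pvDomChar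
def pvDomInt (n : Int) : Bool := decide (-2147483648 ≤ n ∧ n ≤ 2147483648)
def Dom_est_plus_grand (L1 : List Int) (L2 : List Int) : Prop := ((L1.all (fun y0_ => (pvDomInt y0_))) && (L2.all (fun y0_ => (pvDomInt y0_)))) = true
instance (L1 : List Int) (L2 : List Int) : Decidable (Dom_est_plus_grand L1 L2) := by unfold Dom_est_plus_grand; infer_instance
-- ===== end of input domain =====

-- B replaces A's strip / zero-pad / left-to-right scan by one right-to-left pass with a
-- verdict override (objective: alternative).  A mutates its arguments in place (removes
-- their leading zeros); B does not mutate; the equivalence proved is about the return value only.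

-- ===== PORT A =====
-- supprime_zéros: Python raises IndexError on []; Pre_ excludes that, the port returns [] there.
def supprimeZeros : List Int → List Int
  | [] => []
  | [x] => [x]
  | x :: y :: rest => if x = 0 then supprimeZeros (y :: rest) else x :: y :: rest

-- the `for i in range(len(L1))` loop of A, walking both (equal-length) lists together;
-- `as = []` is Python's `i == len(L1) - 1`; a length mismatch cannot occur under equal lengths.
def loopA : List Int → List Int → Bool
  | [], _ => false
  | _ :: _, [] => false
  | a :: as, b :: bs =>
    if a = b then (if as = [] then false else loopA as bs)
    else if a < b then false else true

def est_plus_grand (L1 : List Int) (L2 : List Int) : Bool :=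
  let l1 := supprimeZeros L1
  let l2 := supprimeZeros L2
  if l1 = l2 then true
  else if l1.length < l2.length then
    loopA (List.replicate (l2.length - l1.length) 0 ++ l1) l2
  else
    loopA l1 (List.replicate (l1.length - l2.length) 0 ++ l2)

-- ===== PORT B =====
-- the `for k in range(max(n1, n2))` loop of Source B, with its conditional indexing and override
def est_plus_grand_alt (L1 : List Int) (L2 : List Int) : Bool :=
  let n1 := L1.length
  let n2 := L2.length
  (List.range (max n1 n2)).foldl
    (fun ge k =>
      let a := if k < n1 then L1.getD (n1 - 1 - k) 0 else 0
      let b := if k < n2 then L2.getD (n2 - 1 - k) 0 else 0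
      if a ≠ b then decide (b < a) else ge) true

-- ===== PRECONDITION & SPEC =====
-- Python A raises IndexError when either list is empty (liste[0] in supprime_zéros).
def Pre_est_plus_grand (L1 : List Int) (L2 : List Int) : Prop := L1 ≠ [] ∧ L2 ≠ []
instance (L1 : List Int) (L2 : List Int) : Decidable (Pre_est_plus_grand L1 L2) := by unfold Pre_est_plus_grand; infer_instance
def pvWitness_est_plus_grand : List Int × List Int := ([1, 2], [0, 3])

def Spec_est_plus_grand (L1 : List Int) (L2 : List Int) (out : Bool) : Prop := out = est_plus_grand_alt L1 L2
instance (L1 : List Int) (L2 : List Int) (out : Bool) : Decidable (Spec_est_plus_grand L1 L2 out) := by unfold Spec_est_plus_grand; infer_instance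

-- ===== CLAIM (what is proved, stated in full; the proofs are below) =====
def Claim_equal_est_plus_grand : Prop := ∀ (L1 : List Int) (L2 : List Int), Dom_est_plus_grand L1 L2 → Pre_est_plus_grand L1 L2 → Spec_est_plus_grand L1 L2 (est_plus_grand L1 L2)

-- ===== LEMMAS AND PROOFS =====

-- reference function for the proof: Python's lexicographic `>=` on lists
def lexGe : List Int → List Int → Bool
  | [], [] => true
  | [], _ :: _ => false
  | _ :: _, [] => true
  | a :: as, b :: bs => if a = b then lexGe as bs else decide (b < a)

-- number of removable leading zeros
def zCount : List Int → Nat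
  | x :: y :: rest => if x = 0 then 1 + zCount (y :: rest) else 0
  | _ => 0

def stripB (L : List Int) : List Int := L.drop (zCount L)

lemma strip_eq : ∀ L : List Int, supprimeZeros L = stripB L
  | [] => rfl
  | [_] => rfl
  | x :: y :: rest => by
      by_cases hx : x = 0
      · simp [supprimeZeros, stripB, zCount, hx, strip_eq (y :: rest), Nat.add_comm]
      · simp [supprimeZeros, stripB, zCount, hx]

lemma strip_decompose : ∀ L : List Int, L = List.replicate (zCount L) 0 ++ stripB L
  | [] => rfl
  | [x] => rfl
  | x :: y :: rest => by
      by_cases hx : x = 0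
      · have ih := strip_decompose (y :: rest)
        have hz : zCount (x :: y :: rest) = zCount (y :: rest) + 1 := by
          simp [zCount, hx, Nat.add_comm]
        have hs : stripB (x :: y :: rest) = stripB (y :: rest) := by
          simp [stripB, hz, List.drop_succ_cons]
        rw [hz, hs, List.replicate_succ, List.cons_append, hx]
        exact congrArg (0 :: ·) ih
      · simp [zCount, stripB, hx]

lemma strip_ne_nil : ∀ L : List Int, L ≠ [] → supprimeZeros L ≠ []
  | [], h => absurd rfl h
  | [x], _ => by simp [supprimeZeros]
  | x :: y :: rest, _ => by
      by_cases hx : x = 0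
      · simpa [supprimeZeros, hx] using strip_ne_nil (y :: rest) (by simp)
      · simp [supprimeZeros, hx]

-- after stripping, the list is a singleton or starts with a nonzero digit
lemma strip_shape : ∀ L : List Int,
    (supprimeZeros L).length ≤ 1 ∨ ∃ h t, supprimeZeros L = h :: t ∧ h ≠ 0
  | [] => Or.inl (by simp [supprimeZeros])
  | [x] => Or.inl (by simp [supprimeZeros])
  | x :: y :: rest => by
      by_cases hx : x = 0
      · simpa [supprimeZeros, hx] using strip_shape (y :: rest)
      · exact Or.inr ⟨x, y :: rest, by simp [supprimeZeros, hx], hx⟩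

lemma lexGe_refl (p : List Int) : lexGe p p = true := by
  induction p with
  | nil => rfl
  | cons a t ih => simp [lexGe, ih]

-- A's loop on equal-length lists is the lexicographic compare (false on equal lists)
lemma loopA_eq (p1 p2 : List Int) (hl : p1.length = p2.length) :
    loopA p1 p2 = if p1 = p2 then false else lexGe p1 p2 := by
  induction p1 generalizing p2 with
  | nil =>
      cases p2 with
      | nil => rfl
      | cons b bs => simp at hl
  | cons a as ih =>
      cases p2 with
      | nil => simp at hl
      | cons b bs =>
        simp only [List.length_cons, Nat.add_right_cancel_iff] at hl
        by_cases hab : a = b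
        · subst hab
          by_cases hnil : as = []
          · subst hnil
            have : bs = [] := List.eq_nil_of_length_eq_zero (by simpa using hl.symm)
            subst this
            simp [loopA]
          · have hbs : bs ≠ [] := by
              intro h; subst h
              exact hnil (List.eq_nil_of_length_eq_zero (by simpa using hl))
            simp only [loopA, if_neg hnil, ih bs hl]
            by_cases he : as = bs
            · simp [he]
            · have hne : (a :: as) ≠ (a :: bs) := by simp [he]
              simp [he, hne, lexGe]
        · have hne : (a :: as) ≠ (b :: bs) := by simp [hab]
          simp only [loopA, if_neg hab, if_neg hne, lexGe]
          by_cases hlt : a < b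
          · simp [hlt, not_lt_of_gt hlt]
          · have hgt : b < a := lt_of_le_of_ne (not_lt.mp hlt) (fun h => hab h.symm)
            simp [hlt, hgt]

lemma pad_cons (d : Nat) (hd : 1 ≤ d) (l : List Int) :
    List.replicate d (0:Int) ++ l = 0 :: (List.replicate (d-1) 0 ++ l) := by
  cases d with
  | zero => omega
  | succ k => simp [List.replicate_succ]

-- A, on nonempty inputs, is lexGe of the stripped lists padded to their common length
lemma A_eq_lexGe (l1 l2 : List Int) (n1 : l1 ≠ []) (n2 : l2 ≠ [])
    (s1 : l1.length ≤ 1 ∨ ∃ h t, l1 = h :: t ∧ h ≠ 0)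
    (s2 : l2.length ≤ 1 ∨ ∃ h t, l2 = h :: t ∧ h ≠ 0) :
    (if l1 = l2 then true
     else if l1.length < l2.length then
       loopA (List.replicate (l2.length - l1.length) 0 ++ l1) l2
     else
       loopA l1 (List.replicate (l1.length - l2.length) 0 ++ l2))
    = lexGe (List.replicate (max l1.length l2.length - l1.length) 0 ++ l1)
            (List.replicate (max l1.length l2.length - l2.length) 0 ++ l2) := by
  have len1 : 1 ≤ l1.length := List.length_pos_iff.mpr n1
  have len2 : 1 ≤ l2.length := List.length_pos_iff.mpr n2
  by_cases heq : l1 = l2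
  · subst heq
    simp [lexGe_refl]
  · rw [if_neg heq]
    by_cases hlen : l1.length < l2.length
    · rw [if_pos hlen]
      have hmax1 : max l1.length l2.length - l2.length = 0 := by omega
      have hmax2 : max l1.length l2.length - l1.length = l2.length - l1.length := by omega
      rw [hmax1, hmax2]
      simp only [List.replicate_zero, List.nil_append]
      have hlenp : (List.replicate (l2.length - l1.length) (0:Int) ++ l1).length = l2.length := by
        simp; omega
      have hne : List.replicate (l2.length - l1.length) (0:Int) ++ l1 ≠ l2 := by
        rcases s2 with hs | ⟨h, t, hcons, hh⟩
        · omega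
        · rw [pad_cons _ (by omega) l1, hcons]
          intro hc
          exact hh ((List.cons_eq_cons.mp hc).1.symm)
      rw [loopA_eq _ _ hlenp, if_neg hne]
    · rw [if_neg hlen]
      have hge : l2.length ≤ l1.length := Nat.le_of_not_lt hlen
      have hmax1 : max l1.length l2.length - l1.length = 0 := by omega
      have hmax2 : max l1.length l2.length - l2.length = l1.length - l2.length := by omega
      rw [hmax1, hmax2]
      simp only [List.replicate_zero, List.nil_append]
      have hlenp : l1.length = (List.replicate (l1.length - l2.length) (0:Int) ++ l2).length := by
        simp; omega
      have hne : l1 ≠ List.replicate (l1.length - l2.length) (0:Int) ++ l2 := by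
        by_cases hle : l1.length = l2.length
        · simpa [hle] using heq
        · have hlt : l2.length < l1.length := by omega
          rcases s1 with hs | ⟨h, t, hcons, hh⟩
          · omega
          · rw [pad_cons _ (by omega) l2, hcons]
            intro hc
            exact hh ((List.cons_eq_cons.mp hc).1)
      rw [loopA_eq _ _ hlenp, if_neg hne]

-- lexGe ignores a common block of leading zeros
lemma lexGe_replicate (k : Nat) (x y : List Int) :
    lexGe (List.replicate k 0 ++ x) (List.replicate k 0 ++ y) = lexGe x y := by
  induction k with
  | zero => simp
  | succ m ih => simpa [List.replicate_succ, lexGe] using ih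

-- B's conditional indexing reads exactly the padded list
lemma access_pad (l : List Int) (N k : Nat) (hN : l.length ≤ N) (hk : k < N) :
    (if k < l.length then l.getD (l.length - 1 - k) 0 else 0)
    = (List.replicate (N - l.length) (0:Int) ++ l).getD (N - 1 - k) 0 := by
  by_cases h : k < l.length
  · have hi : N - 1 - k = (N - l.length) + (l.length - 1 - k) := by omega
    rw [if_pos h, hi, List.getD_append_right _ _ _ _ (by simp)]
    simp
  · have hi : N - 1 - k < N - l.length := by omega
    rw [if_neg h, List.getD_append _ _ _ _ (by simpa using hi)]
    simp [List.getD_eq_getElem?_getD, hi]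

-- the right-to-left override fold over a reversed zip is lexGe-with-default
lemma ovr_rev : ∀ (p1 p2 : List Int), p1.length = p2.length → ∀ g : Bool,
    ((p1.zip p2).reverse).foldl
      (fun ge ab => if ab.1 ≠ ab.2 then decide (ab.2 < ab.1) else ge) g
    = if p1 = p2 then g else lexGe p1 p2 := by
  intro p1
  induction p1 with
  | nil =>
      intro p2 hl g
      have : p2 = [] := List.eq_nil_of_length_eq_zero (by simpa using hl.symm)
      subst this; rfl
  | cons a as ih =>
      intro p2 hl g
      cases p2 with
      | nil => simp at hl
      | cons b bs =>
        simp only [List.length_cons, Nat.add_right_cancel_iff] at hl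
        rw [List.zip_cons_cons, List.reverse_cons, List.foldl_append, ih bs hl g]
        simp only [List.foldl_cons, List.foldl_nil]
        by_cases hab : a = b
        · subst hab
          by_cases he : as = bs
          · simp [he]
          · have : (a :: as) ≠ (a :: bs) := by simp [he]
            simp [he, this, lexGe]
        · have : (a :: as) ≠ (b :: bs) := by simp [hab]
          simp [hab, this, lexGe]

-- the reversed zip of two length-N lists, written as a map over range N from the right
lemma zip_rev_as_range (P1 P2 : List Int) (N : Nat) (h1 : P1.length = N) (h2 : P2.length = N) :
    (P1.zip P2).reverse
    = (List.range N).map (fun k => (P1.getD (N - 1 - k) 0, P2.getD (N - 1 - k) 0)) := by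
  have hz : (P1.zip P2).length = N := by simp [h1, h2]
  apply List.ext_getElem
  · simp [hz]
  · intro i hi1 hi2
    have hiN : i < N := by simpa [hz] using hi1
    rw [List.getElem_reverse, List.getElem_map, List.getElem_range, List.getElem_zip]
    rw [List.getD_eq_getElem _ _ (by omega), List.getD_eq_getElem _ _ (by omega)]
    simp [hz]

-- B is lexGe of the (un-stripped) lists padded to their common length
lemma B_eq_lexGe (L1 L2 : List Int) :
    est_plus_grand_alt L1 L2
    = lexGe (List.replicate (max L1.length L2.length - L1.length) 0 ++ L1)
            (List.replicate (max L1.length L2.length - L2.length) 0 ++ L2) := by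
  set N := max L1.length L2.length with hN
  set P1 := List.replicate (N - L1.length) (0:Int) ++ L1 with hP1
  set P2 := List.replicate (N - L2.length) (0:Int) ++ L2 with hP2
  have hl1 : P1.length = N := by simp [hP1]; omega
  have hl2 : P2.length = N := by simp [hP2]; omega
  have hstep : est_plus_grand_alt L1 L2
      = (List.range N).foldl
          (fun ge k =>
            let a := P1.getD (N - 1 - k) 0
            let b := P2.getD (N - 1 - k) 0
            if a ≠ b then decide (b < a) else ge) true := by
    unfold est_plus_grand_alt
    apply PySem.List.foldl_congr_mem
    intro acc k hk
    have hkN : k < N := List.mem_range.mp hk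
    simp only
    rw [access_pad L1 N k (by omega) hkN, access_pad L2 N k (by omega) hkN]
  rw [hstep]
  have hmap : (List.range N).foldl
      (fun ge k =>
        let a := P1.getD (N - 1 - k) 0
        let b := P2.getD (N - 1 - k) 0
        if a ≠ b then decide (b < a) else ge) true
      = ((List.range N).map (fun k => (P1.getD (N - 1 - k) 0, P2.getD (N - 1 - k) 0))).foldl
          (fun ge ab => if ab.1 ≠ ab.2 then decide (ab.2 < ab.1) else ge) true := by
    rw [List.foldl_map]
  rw [hmap, ← zip_rev_as_range P1 P2 N hl1 hl2, ovr_rev P1 P2 (by rw [hl1, hl2]) true]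
  by_cases he : P1 = P2
  · simp [he, lexGe_refl]
  · simp [he]

-- padding the original list to width N equals padding its stripped form to width N
lemma pad_strip (l : List Int) (N : Nat) (hN : l.length ≤ N) :
    List.replicate (N - l.length) (0:Int) ++ l
    = List.replicate (N - (stripB l).length) (0:Int) ++ stripB l := by
  have hd := strip_decompose l
  have hlen : l.length = zCount l + (stripB l).length := by
    simpa using congrArg List.length hd
  calc List.replicate (N - l.length) (0:Int) ++ l
      = List.replicate (N - l.length) 0 ++ (List.replicate (zCount l) 0 ++ stripB l) := by
        rw [← hd]
    _ = List.replicate ((N - l.length) + zCount l) 0 ++ stripB l := by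
        rw [← List.append_assoc, ← List.replicate_add]
    _ = List.replicate (N - (stripB l).length) 0 ++ stripB l := by
        congr 2
        omega

-- ===== VERDICT (by name: the statement is the Claim_ definition above) =====
theorem est_plus_grand_spec : Claim_equal_est_plus_grand := by
  intro L1 L2 _ hpre
  show est_plus_grand L1 L2 = est_plus_grand_alt L1 L2
  have hA := A_eq_lexGe (supprimeZeros L1) (supprimeZeros L2)
    (strip_ne_nil L1 hpre.1) (strip_ne_nil L2 hpre.2)
    (strip_shape L1) (strip_shape L2)
  unfold est_plus_grand
  rw [hA, B_eq_lexGe]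
  set s1 := supprimeZeros L1 with hs1
  set s2 := supprimeZeros L2 with hs2
  have hlen1 : s1.length ≤ L1.length := by
    rw [hs1, strip_eq]; simp [stripB]
  have hlen2 : s2.length ≤ L2.length := by
    rw [hs2, strip_eq]; simp [stripB]
  set N := max L1.length L2.length with hN
  set N' := max s1.length s2.length with hN'
  have hNN : N' ≤ N := by omega
  have hsb1 : stripB L1 = s1 := by rw [hs1, strip_eq]
  have hsb2 : stripB L2 = s2 := by rw [hs2, strip_eq]
  have h1 : List.replicate (N - L1.length) (0:Int) ++ L1
      = List.replicate (N - N') 0 ++ (List.replicate (N' - s1.length) 0 ++ s1) := by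
    rw [pad_strip L1 N (by omega), hsb1, ← List.append_assoc, ← List.replicate_add]
    congr 2
    omega
  have h2 : List.replicate (N - L2.length) (0:Int) ++ L2
      = List.replicate (N - N') 0 ++ (List.replicate (N' - s2.length) 0 ++ s2) := by
    rw [pad_strip L2 N (by omega), hsb2, ← List.append_assoc, ← List.replicate_add]
    congr 2
    omega
  rw [h1, h2, lexGe_replicate]
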